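-- pv_equiv track=rewrite | github.com/SiddiqaKashaf/customerServiceChatbot | project_backend/src/services/rag_service.py | generate_suggested_responses
-- ===== SOURCE A (Python) =====
-- from typing import List, Dict, Any, Optional
--
-- def generate_suggested_responses(query: str, relevant_docs: List[Dict[str, Any]] = None) -> List[str]:
--     """Generate context-aware suggested responses"""
--     query_lower = query.lower()
--     # For each suggestion, ensure a direct, professional answer is available in process_message
--     if any(word in query_lower for word in ['cloud', 'migration']):
--         return [
--             "What's the timeline for cloud migration?",
--             "Do you support hybrid cloud solutions?",
--             "What's included in the migration process?"
--         ]
--     elif any(word in query_lower for word in ['ai', 'machine learning', 'ml']):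
--         return [
--             "What types of AI solutions do you offer?",
--             "How long does AI development take?",
--             "Do you provide AI consulting?"
--         ]
--     elif any(word in query_lower for word in ['security', 'cybersecurity']):
--         return [
--             "What security certifications do you have?",
--             "Do you offer 24/7 security monitoring?",
--             "What's your incident response time?"
--         ]
--     elif any(word in query_lower for word in ['web', 'website', 'application']):
--         return [
--             "What technologies do you use for web development?",
--             "Do you provide ongoing maintenance?",
--             "Can you help with e-commerce platforms?"
--         ]
--     elif any(word in query_lower for word in ['mobile', 'app']):
--         return [
--             "Do you develop for both iOS and Android?",
--             "What's the cost of mobile app development?",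
--             "Do you provide app maintenance services?"
--         ]
--     elif any(word in query_lower for word in ['data', 'analytics']):
--         return [
--             "What BI tools do you work with?",
--             "Can you help with data strategy?",
--             "Do you provide custom dashboards?"
--         ]
--     elif any(word in query_lower for word in ['price', 'cost', 'pricing']):
--         return [
--             "What's included in your pricing?",
--             "Do you offer custom pricing?",
--             "What are your payment terms?"
--         ]
--     elif any(word in query_lower for word in ['support', 'help']):
--         return [
--             "What are your support response times?",
--             "Do you offer 24/7 support?",
--             "How can I contact technical support?"
--         ]
--     else:
--         return [
--             "Tell me about your tech services",
--             "What are your pricing plans?",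
--             "I need technical support",
--             "How can I contact you?"
--         ]
-- ===== SOURCE B (Python) =====
-- _KEYWORD_PRIORITY = [
--     ('cloud', 0), ('migration', 0),
--     ('ai', 1), ('machine learning', 1), ('ml', 1),
--     ('security', 2), ('cybersecurity', 2),
--     ('web', 3), ('website', 3), ('application', 3),
--     ('mobile', 4), ('app', 4),
--     ('data', 5), ('analytics', 5),
--     ('price', 6), ('cost', 6), ('pricing', 6),
--     ('support', 7), ('help', 7),
-- ]
--
-- _RESPONSES = [
--     ["What's the timeline for cloud migration?",
--      "Do you support hybrid cloud solutions?",
--      "What's included in the migration process?"],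
--     ["What types of AI solutions do you offer?",
--      "How long does AI development take?",
--      "Do you provide AI consulting?"],
--     ["What security certifications do you have?",
--      "Do you offer 24/7 security monitoring?",
--      "What's your incident response time?"],
--     ["What technologies do you use for web development?",
--      "Do you provide ongoing maintenance?",
--      "Can you help with e-commerce platforms?"],
--     ["Do you develop for both iOS and Android?",
--      "What's the cost of mobile app development?",
--      "Do you provide app maintenance services?"],
--     ["What BI tools do you work with?",
--      "Can you help with data strategy?",
--      "Do you provide custom dashboards?"],
--     ["What's included in your pricing?",
--      "Do you offer custom pricing?",
--      "What are your payment terms?"],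
--     ["What are your support response times?",
--      "Do you offer 24/7 support?",
--      "How can I contact technical support?"],
--     ["Tell me about your tech services",
--      "What are your pricing plans?",
--      "I need technical support",
--      "How can I contact you?"],
-- ]
--
-- def generate_suggested_responses(query: str, relevant_docs=None):
--     """Minimum matched priority over a flat keyword->priority map selects the responses.
--
--     Priorities are nondecreasing in table order, so the minimum over ALL
--     matched keywords equals the branch the original if/elif priority chooses.
--     """
--     q = query.lower()
--     best = min((pri for kw, pri in _KEYWORD_PRIORITY if kw in q),
--                default=len(_RESPONSES) - 1)
--     return _RESPONSES[best]
-- ===== Notes on version B (the rewrite author's own statement) =====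
-- stated objective: alternative
-- what changed: Replaced the short-circuiting eight-branch if/elif chain by a flat keyword->priority map: B collects the priorities of ALL matching keywords, takes their minimum (default = last index), and indexes a response array; nondecreasing priorities make the minimum coincide with the chain's first firing branch.
import Mathlib
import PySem

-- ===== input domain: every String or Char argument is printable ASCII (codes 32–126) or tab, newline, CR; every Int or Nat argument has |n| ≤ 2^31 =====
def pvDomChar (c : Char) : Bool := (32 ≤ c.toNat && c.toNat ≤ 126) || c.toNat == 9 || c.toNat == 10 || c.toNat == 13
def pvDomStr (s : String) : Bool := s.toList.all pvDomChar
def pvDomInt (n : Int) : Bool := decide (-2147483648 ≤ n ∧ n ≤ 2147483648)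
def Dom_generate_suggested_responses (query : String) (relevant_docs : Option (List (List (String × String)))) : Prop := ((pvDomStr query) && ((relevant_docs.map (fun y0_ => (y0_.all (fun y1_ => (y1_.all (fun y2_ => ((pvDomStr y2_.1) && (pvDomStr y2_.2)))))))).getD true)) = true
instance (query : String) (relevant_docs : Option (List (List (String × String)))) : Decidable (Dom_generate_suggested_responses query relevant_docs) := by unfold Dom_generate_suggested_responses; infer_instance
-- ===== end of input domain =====

-- B replaces A's short-circuiting if/elif chain by a flat keyword→priority map:
-- it takes the MINIMUM priority among all matched keywords and indexes a response
-- array with it (objective: alternative decomposition, same cost).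

-- ===== PORT A =====
-- literal transliteration of A's if/elif chain; 'word in query_lower' = PySem.Str.isIn
def generate_suggested_responses (query : String) (_relevant_docs : Option (List (List (String × String)))) : List String :=
  let query_lower := PySem.Str.lower query
  if ["cloud", "migration"].any (fun word => PySem.Str.isIn word query_lower) then
    ["What's the timeline for cloud migration?",
     "Do you support hybrid cloud solutions?",
     "What's included in the migration process?"]
  else if ["ai", "machine learning", "ml"].any (fun word => PySem.Str.isIn word query_lower) then
    ["What types of AI solutions do you offer?",
     "How long does AI development take?",
     "Do you provide AI consulting?"]
  else if ["security", "cybersecurity"].any (fun word => PySem.Str.isIn word query_lower) then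
    ["What security certifications do you have?",
     "Do you offer 24/7 security monitoring?",
     "What's your incident response time?"]
  else if ["web", "website", "application"].any (fun word => PySem.Str.isIn word query_lower) then
    ["What technologies do you use for web development?",
     "Do you provide ongoing maintenance?",
     "Can you help with e-commerce platforms?"]
  else if ["mobile", "app"].any (fun word => PySem.Str.isIn word query_lower) then
    ["Do you develop for both iOS and Android?",
     "What's the cost of mobile app development?",
     "Do you provide app maintenance services?"]
  else if ["data", "analytics"].any (fun word => PySem.Str.isIn word query_lower) then
    ["What BI tools do you work with?",
     "Can you help with data strategy?",
     "Do you provide custom dashboards?"]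
  else if ["price", "cost", "pricing"].any (fun word => PySem.Str.isIn word query_lower) then
    ["What's included in your pricing?",
     "Do you offer custom pricing?",
     "What are your payment terms?"]
  else if ["support", "help"].any (fun word => PySem.Str.isIn word query_lower) then
    ["What are your support response times?",
     "Do you offer 24/7 support?",
     "How can I contact technical support?"]
  else
    ["Tell me about your tech services",
     "What are your pricing plans?",
     "I need technical support",
     "How can I contact you?"]

-- ===== PORT B =====
-- Source B's flat keyword → priority table (priorities nondecreasing in order)
def pvKeywordPriority : List (String × Nat) :=
  [("cloud", 0), ("migration", 0),
   ("ai", 1), ("machine learning", 1), ("ml", 1),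
   ("security", 2), ("cybersecurity", 2),
   ("web", 3), ("website", 3), ("application", 3),
   ("mobile", 4), ("app", 4),
   ("data", 5), ("analytics", 5),
   ("price", 6), ("cost", 6), ("pricing", 6),
   ("support", 7), ("help", 7)]

-- Source B's response array, indexed by priority; last entry = default
def pvResponses : List (List String) :=
  [["What's the timeline for cloud migration?",
    "Do you support hybrid cloud solutions?",
    "What's included in the migration process?"],
   ["What types of AI solutions do you offer?",
    "How long does AI development take?",
    "Do you provide AI consulting?"],
   ["What security certifications do you have?",
    "Do you offer 24/7 security monitoring?",
    "What's your incident response time?"],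
   ["What technologies do you use for web development?",
    "Do you provide ongoing maintenance?",
    "Can you help with e-commerce platforms?"],
   ["Do you develop for both iOS and Android?",
    "What's the cost of mobile app development?",
    "Do you provide app maintenance services?"],
   ["What BI tools do you work with?",
    "Can you help with data strategy?",
    "Do you provide custom dashboards?"],
   ["What's included in your pricing?",
    "Do you offer custom pricing?",
    "What are your payment terms?"],
   ["What are your support response times?",
    "Do you offer 24/7 support?",
    "How can I contact technical support?"],
   ["Tell me about your tech services",
    "What are your pricing plans?",
    "I need technical support",
    "How can I contact you?"]]

-- min(gen, default) = min? of the matched priorities, default when empty;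
-- the final '.getD []' only totalizes the list index, which is always in range.
def generate_suggested_responses_alt (query : String) (_relevant_docs : Option (List (List (String × String)))) : List String :=
  let q := PySem.Str.lower query
  let best : Nat :=
    (PySem.List.min?
        ((pvKeywordPriority.filter (fun x => PySem.Str.isIn x.1 q)).map Prod.snd)
        (fun y => y)).getD (pvResponses.length - 1)
  (PySem.List.pyGet? pvResponses (Int.ofNat best)).getD []

-- ===== PRECONDITION & SPEC =====
def Spec_generate_suggested_responses (query : String) (relevant_docs : Option (List (List (String × String)))) (out : List String) : Prop := out = generate_suggested_responses_alt query relevant_docs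
instance (query : String) (relevant_docs : Option (List (List (String × String)))) (out : List String) : Decidable (Spec_generate_suggested_responses query relevant_docs out) := by unfold Spec_generate_suggested_responses; infer_instance

-- ===== CLAIM =====
def Claim_equal_generate_suggested_responses : Prop := ∀ (query : String) (relevant_docs : Option (List (List (String × String)))), Dom_generate_suggested_responses query relevant_docs → Spec_generate_suggested_responses query relevant_docs (generate_suggested_responses query relevant_docs)

-- ===== LEMMAS AND PROOFS =====

-- folding min from a lower bound of the list returns that bound
theorem pv_foldl_min_self (p : Nat) (t : List Nat) (h : ∀ y ∈ t, p ≤ y) :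
    t.foldl min p = p := by
  induction t with
  | nil => rfl
  | cons a t ih =>
      simp only [List.foldl_cons]
      rw [min_eq_left (h a (List.mem_cons_self))]
      exact ih (fun y hy => h y (List.mem_cons_of_mem _ hy))

-- on a priority-sorted table, the minimum matched priority is the priority of
-- the FIRST matching entry (A's if/elif order)
theorem pv_minMatch (pred : String → Bool) (d : Nat) :
    ∀ (l : List (String × Nat)), List.Pairwise (· ≤ ·) (l.map Prod.snd) →
    (PySem.List.min? ((l.filter (fun x => pred x.1)).map Prod.snd) (fun y => y)).getD d
    = ((l.find? (fun x => pred x.1)).map Prod.snd).getD d := by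
  intro l
  induction l with
  | nil => intro _; rfl
  | cons x t ih =>
      intro hs
      rw [List.map_cons, List.pairwise_cons] at hs
      cases hp : pred x.1 with
      | true =>
          simp only [List.filter_cons, hp, if_pos, List.map_cons,
            PySem.List.min?_id_cons, List.find?_cons]
          apply pv_foldl_min_self
          intro y hy
          rcases List.mem_map.mp hy with ⟨z, hz, rfl⟩
          exact hs.1 z.2 (List.mem_map_of_mem (List.mem_of_mem_filter hz))
      | false =>
          simp only [List.filter_cons, hp, List.find?_cons]
          exact ih hs.2

-- ===== VERDICT =====
theorem generate_suggested_responses_spec : Claim_equal_generate_suggested_responses := by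
  intro query relevant_docs _
  unfold Spec_generate_suggested_responses
  simp only [generate_suggested_responses_alt]
  rw [pv_minMatch (fun s => PySem.Str.isIn s (PySem.Str.lower query)) (pvResponses.length - 1) pvKeywordPriority (by decide)]
  simp only [generate_suggested_responses, pvKeywordPriority, List.find?]
  by_cases h1 : PySem.Chars.isIn ['c', 'l', 'o', 'u', 'd'] (PySem.Chars.lower query.toList) = true
  · simp [pvResponses, h1, PySem.List.pyGet?, PySem.List.pyIdx?]
  by_cases h2 : PySem.Chars.isIn ['m', 'i', 'g', 'r', 'a', 't', 'i', 'o', 'n'] (PySem.Chars.lower query.toList) = true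
  · simp [pvResponses, h1, h2, PySem.List.pyGet?, PySem.List.pyIdx?]
  by_cases h3 : PySem.Chars.isIn ['a', 'i'] (PySem.Chars.lower query.toList) = true
  · simp [pvResponses, h1, h2, h3, PySem.List.pyGet?, PySem.List.pyIdx?]
  by_cases h4 : PySem.Chars.isIn ['m', 'a', 'c', 'h', 'i', 'n', 'e', ' ', 'l', 'e', 'a', 'r', 'n', 'i', 'n', 'g'] (PySem.Chars.lower query.toList) = true
  · simp [pvResponses, h1, h2, h3, h4, PySem.List.pyGet?, PySem.List.pyIdx?]
  by_cases h5 : PySem.Chars.isIn ['m', 'l'] (PySem.Chars.lower query.toList) = true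
  · simp [pvResponses, h1, h2, h3, h4, h5, PySem.List.pyGet?, PySem.List.pyIdx?]
  by_cases h6 : PySem.Chars.isIn ['s', 'e', 'c', 'u', 'r', 'i', 't', 'y'] (PySem.Chars.lower query.toList) = true
  · simp [pvResponses, h1, h2, h3, h4, h5, h6, PySem.List.pyGet?, PySem.List.pyIdx?]
  by_cases h7 : PySem.Chars.isIn ['c', 'y', 'b', 'e', 'r', 's', 'e', 'c', 'u', 'r', 'i', 't', 'y'] (PySem.Chars.lower query.toList) = true
  · simp [pvResponses, h1, h2, h3, h4, h5, h6, h7, PySem.List.pyGet?, PySem.List.pyIdx?]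
  by_cases h8 : PySem.Chars.isIn ['w', 'e', 'b'] (PySem.Chars.lower query.toList) = true
  · simp [pvResponses, h1, h2, h3, h4, h5, h6, h7, h8, PySem.List.pyGet?, PySem.List.pyIdx?]
  by_cases h9 : PySem.Chars.isIn ['w', 'e', 'b', 's', 'i', 't', 'e'] (PySem.Chars.lower query.toList) = true
  · simp [pvResponses, h1, h2, h3, h4, h5, h6, h7, h8, h9, PySem.List.pyGet?, PySem.List.pyIdx?]
  by_cases h10 : PySem.Chars.isIn ['a', 'p', 'p', 'l', 'i', 'c', 'a', 't', 'i', 'o', 'n'] (PySem.Chars.lower query.toList) = true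
  · simp [pvResponses, h1, h2, h3, h4, h5, h6, h7, h8, h9, h10, PySem.List.pyGet?, PySem.List.pyIdx?]
  by_cases h11 : PySem.Chars.isIn ['m', 'o', 'b', 'i', 'l', 'e'] (PySem.Chars.lower query.toList) = true
  · simp [pvResponses, h1, h2, h3, h4, h5, h6, h7, h8, h9, h10, h11, PySem.List.pyGet?, PySem.List.pyIdx?]
  by_cases h12 : PySem.Chars.isIn ['a', 'p', 'p'] (PySem.Chars.lower query.toList) = true
  · simp [pvResponses, h1, h2, h3, h4, h5, h6, h7, h8, h9, h10, h11, h12, PySem.List.pyGet?, PySem.List.pyIdx?]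
  by_cases h13 : PySem.Chars.isIn ['d', 'a', 't', 'a'] (PySem.Chars.lower query.toList) = true
  · simp [pvResponses, h1, h2, h3, h4, h5, h6, h7, h8, h9, h10, h11, h12, h13, PySem.List.pyGet?, PySem.List.pyIdx?]
  by_cases h14 : PySem.Chars.isIn ['a', 'n', 'a', 'l', 'y', 't', 'i', 'c', 's'] (PySem.Chars.lower query.toList) = true
  · simp [pvResponses, h1, h2, h3, h4, h5, h6, h7, h8, h9, h10, h11, h12, h13, h14, PySem.List.pyGet?, PySem.List.pyIdx?]
  by_cases h15 : PySem.Chars.isIn ['p', 'r', 'i', 'c', 'e'] (PySem.Chars.lower query.toList) = true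
  · simp [pvResponses, h1, h2, h3, h4, h5, h6, h7, h8, h9, h10, h11, h12, h13, h14, h15, PySem.List.pyGet?, PySem.List.pyIdx?]
  by_cases h16 : PySem.Chars.isIn ['c', 'o', 's', 't'] (PySem.Chars.lower query.toList) = true
  · simp [pvResponses, h1, h2, h3, h4, h5, h6, h7, h8, h9, h10, h11, h12, h13, h14, h15, h16, PySem.List.pyGet?, PySem.List.pyIdx?]
  by_cases h17 : PySem.Chars.isIn ['p', 'r', 'i', 'c', 'i', 'n', 'g'] (PySem.Chars.lower query.toList) = true
  · simp [pvResponses, h1, h2, h3, h4, h5, h6, h7, h8, h9, h10, h11, h12, h13, h14, h15, h16, h17, PySem.List.pyGet?, PySem.List.pyIdx?]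
  by_cases h18 : PySem.Chars.isIn ['s', 'u', 'p', 'p', 'o', 'r', 't'] (PySem.Chars.lower query.toList) = true
  · simp [pvResponses, h1, h2, h3, h4, h5, h6, h7, h8, h9, h10, h11, h12, h13, h14, h15, h16, h17, h18, PySem.List.pyGet?, PySem.List.pyIdx?]
  by_cases h19 : PySem.Chars.isIn ['h', 'e', 'l', 'p'] (PySem.Chars.lower query.toList) = true
  · simp [pvResponses, h1, h2, h3, h4, h5, h6, h7, h8, h9, h10, h11, h12, h13, h14, h15, h16, h17, h18, h19, PySem.List.pyGet?, PySem.List.pyIdx?]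
  simp [pvResponses, h1, h2, h3, h4, h5, h6, h7, h8, h9, h10, h11, h12, h13, h14, h15, h16, h17, h18, h19, PySem.List.pyGet?, PySem.List.pyIdx?]
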